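-- pv_equiv track=rewrite | github.com/TaeGyeong/my-algo | 17779/main.py | sum_1D
-- ===== SOURCE A (Python) =====
-- def sum_1D(graph, x, y, d1, d2):
--     sum_1 = 0
--     for i in range(x+d1):
--         for j in range(y+1):
--             sum_1 = sum_1 + graph[i][j]
--     t = -1
--     for i in range(x, x+d1):
--         t = t + 1
--         for j in range(y-t, y+1):
--             sum_1 = sum_1 - graph[i][j]
--     return sum_1
-- ===== SOURCE B (Python) =====
-- def sum_1D(graph, x, y, d1, d2):
--     s = 0
--     for i in range(x + d1):
--         for j in range(y + 1):
--             v = graph[i][j]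
--             s += v
--             if i >= x and j >= y - (i - x):
--                 s -= v
--     return s
-- ===== Notes on version B (the rewrite author's own statement) =====
-- stated objective: alternative
-- what changed: Replaces A's two separate loop nests (rectangle add pass, then a t-counting triangle subtract pass) with a single fused row-major pass that adds every rectangle cell and immediately cancels it when it lies in the triangle i >= x, j >= y-(i-x).
-- intended difference: When d1 > 0 and (x < 0 or y < d1-1), A's triangle pass uses negative indices that wrap around Python-style and subtracts unrelated cells from the end of a row/grid, while B subtracts only the actual triangle cells inside the rectangle, which is the intended region sum. — e.g. on sum_1D([[1, 2], [3, 4]], 0, 0, 2, 0): A returns -4, B returns 0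
import Mathlib
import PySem

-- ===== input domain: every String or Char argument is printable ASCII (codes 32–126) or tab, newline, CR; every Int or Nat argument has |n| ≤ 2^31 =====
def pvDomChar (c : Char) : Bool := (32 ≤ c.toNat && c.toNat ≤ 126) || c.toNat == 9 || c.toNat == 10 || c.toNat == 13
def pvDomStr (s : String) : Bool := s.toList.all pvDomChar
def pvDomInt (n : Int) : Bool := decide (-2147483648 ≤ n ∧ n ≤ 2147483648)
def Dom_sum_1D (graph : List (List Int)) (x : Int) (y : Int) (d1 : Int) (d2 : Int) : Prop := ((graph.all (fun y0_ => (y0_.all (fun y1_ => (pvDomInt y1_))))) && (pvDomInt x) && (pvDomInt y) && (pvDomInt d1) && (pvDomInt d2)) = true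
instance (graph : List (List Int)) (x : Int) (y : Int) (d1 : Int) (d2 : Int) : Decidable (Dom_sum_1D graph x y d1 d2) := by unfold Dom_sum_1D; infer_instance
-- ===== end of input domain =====

-- B fuses A's two loop nests (rectangle add pass, then a t-counting triangle subtract pass) into one
-- row-major pass that adds each rectangle cell and immediately cancels it when it lies in the triangle
-- (objective: alternative decomposition, same cost).

-- ===== PORT A =====
def sum_1D (graph : List (List Int)) (x : Int) (y : Int) (d1 : Int) (d2 : Int) : Int :=
  let s1 : Int := (PySem.List.pyRange 0 (x + d1) 1).foldl
    (fun s i => (PySem.List.pyRange 0 (y + 1) 1).foldl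
      (fun s j => s + PySem.List.pyGetD (PySem.List.pyGetD graph i []) j 0) s) 0
  let st : Int × Int := (PySem.List.pyRange x (x + d1) 1).foldl
    (fun (p : Int × Int) i =>
      let t := p.2 + 1
      ((PySem.List.pyRange (y - t) (y + 1) 1).foldl
        (fun s j => s - PySem.List.pyGetD (PySem.List.pyGetD graph i []) j 0) p.1, t))
    (s1, -1)
  st.1

-- ===== PORT B =====
def sum_1D_alt (graph : List (List Int)) (x : Int) (y : Int) (d1 : Int) (d2 : Int) : Int :=
  (PySem.List.pyRange 0 (x + d1) 1).foldl
    (fun s i => (PySem.List.pyRange 0 (y + 1) 1).foldl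
      (fun s j =>
        let v := PySem.List.pyGetD (PySem.List.pyGetD graph i []) j 0
        let s := s + v
        if x ≤ i ∧ y - (i - x) ≤ j then s - v else s) s) 0

-- ===== PRECONDITION & SPEC =====
-- Pre_: exactly the inputs where the Python A returns (every index it touches is in Python range,
-- negative wraparound allowed); elsewhere A raises IndexError.
def Pre_sum_1D (graph : List (List Int)) (x : Int) (y : Int) (d1 : Int) (d2 : Int) : Prop :=
  ((0 < x + d1 ∧ 0 ≤ y) →
    (x + d1 ≤ (graph.length : Int) ∧
     ∀ r ∈ graph.take (x + d1).toNat, y < (r.length : Int))) ∧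
  (0 < d1 →
    (-(graph.length : Int) ≤ x ∧ x + d1 ≤ (graph.length : Int) ∧
     ∀ i ∈ PySem.List.pyRange (max x (-(graph.length : Int))) (min (x + d1) (graph.length : Int)) 1,
       -(((PySem.List.pyGetD graph i []).length : Int)) ≤ y - (i - x) ∧
       y < ((PySem.List.pyGetD graph i []).length : Int)))
instance (graph : List (List Int)) (x : Int) (y : Int) (d1 : Int) (d2 : Int) : Decidable (Pre_sum_1D graph x y d1 d2) := by unfold Pre_sum_1D; infer_instance

def pvWitness_sum_1D : List (List Int) × Int × Int × Int × Int := ([[1, 2], [3, 4]], 1, 1, 1, 0)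

-- When d1 > 0 and (x < 0 or y < d1-1), A's triangle pass uses negative indices that wrap around
-- Python-style and subtracts unrelated cells from the end of a row/grid, while B subtracts only the
-- actual triangle cells inside the rectangle, which is the intended region sum.
def D_sum_1D (graph : List (List Int)) (x : Int) (y : Int) (d1 : Int) (d2 : Int) : Prop :=
  0 < d1 ∧ (x < 0 ∨ y < d1 - 1)
instance (graph : List (List Int)) (x : Int) (y : Int) (d1 : Int) (d2 : Int) : Decidable (D_sum_1D graph x y d1 d2) := by unfold D_sum_1D; infer_instance

def Spec_sum_1D (graph : List (List Int)) (x : Int) (y : Int) (d1 : Int) (d2 : Int) (out : Int) : Prop := ¬ D_sum_1D graph x y d1 d2 → out = sum_1D_alt graph x y d1 d2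
instance (graph : List (List Int)) (x : Int) (y : Int) (d1 : Int) (d2 : Int) (out : Int) : Decidable (Spec_sum_1D graph x y d1 d2 out) := by unfold Spec_sum_1D; infer_instance

def pvDiffWitness_sum_1D : List (List Int) × Int × Int × Int × Int := ([[1, 2], [3, 4]], 0, 0, 2, 0)
def pvDiffWitnessOut_sum_1D : Int × Int := (-4, 0)

-- ===== CLAIM (what is proved, stated in full; the proofs are below) =====
def Claim_unchanged_sum_1D : Prop := ∀ (graph : List (List Int)) (x : Int) (y : Int) (d1 : Int) (d2 : Int), Dom_sum_1D graph x y d1 d2 → Pre_sum_1D graph x y d1 d2 → Spec_sum_1D graph x y d1 d2 (sum_1D graph x y d1 d2)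
def Claim_changed_sum_1D : Prop := Dom_sum_1D (pvDiffWitness_sum_1D.1) (pvDiffWitness_sum_1D.2.1) (pvDiffWitness_sum_1D.2.2.1) (pvDiffWitness_sum_1D.2.2.2.1) (pvDiffWitness_sum_1D.2.2.2.2) ∧ Pre_sum_1D (pvDiffWitness_sum_1D.1) (pvDiffWitness_sum_1D.2.1) (pvDiffWitness_sum_1D.2.2.1) (pvDiffWitness_sum_1D.2.2.2.1) (pvDiffWitness_sum_1D.2.2.2.2) ∧ D_sum_1D (pvDiffWitness_sum_1D.1) (pvDiffWitness_sum_1D.2.1) (pvDiffWitness_sum_1D.2.2.1) (pvDiffWitness_sum_1D.2.2.2.1) (pvDiffWitness_sum_1D.2.2.2.2) ∧ sum_1D (pvDiffWitness_sum_1D.1) (pvDiffWitness_sum_1D.2.1) (pvDiffWitness_sum_1D.2.2.1) (pvDiffWitness_sum_1D.2.2.2.1) (pvDiffWitness_sum_1D.2.2.2.2) = pvDiffWitnessOut_sum_1D.1 ∧ sum_1D_alt (pvDiffWitness_sum_1D.1) (pvDiffWitness_sum_1D.2.1) (pvDiffWitness_sum_1D.2.2.1) (pvDiffWitness_sum_1D.2.2.2.1)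 (pvDiffWitness_sum_1D.2.2.2.2) = pvDiffWitnessOut_sum_1D.2 ∧ pvDiffWitnessOut_sum_1D.1 ≠ pvDiffWitnessOut_sum_1D.2

-- ===== LEMMAS AND PROOFS =====

-- 'for j …: s -= g j' is s minus the sum
theorem pvFoldlSub (g : Int → Int) (l : List Int) (s : Int) :
    l.foldl (fun s j => s - g j) s = s - (l.map g).sum := by
  have h : (fun (s : Int) j => s - g j) = fun s j => s + (-g j) := by funext s j; ring
  rw [h, PySem.List.foldl_add, show (fun j => -g j) = (Neg.neg ∘ g) from rfl, ← List.map_map,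
    ← List.sum_neg]
  ring

-- A's rectangle double loop is the double sum
theorem pvRect (f : Int → Int → Int) (I J : List Int) (s : Int) :
    I.foldl (fun s i => J.foldl (fun s j => s + f i j) s) s
      = s + (I.map (fun i => (J.map (f i)).sum)).sum := by
  have h : (fun (s : Int) i => J.foldl (fun s j => s + f i j) s)
      = fun s i => s + (J.map (f i)).sum := by
    funext s i; rw [PySem.List.foldl_add]
  rw [h, PySem.List.foldl_add]

-- A's triangle pass: invariant t = i - x - 1 entering each row
theorem pvTri (f : Int → Int → Int) (x y : Int) (n : Nat) : ∀ (i0 t0 s : Int), t0 = i0 - x - 1 →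
    (((PySem.List.pyRange i0 (i0 + (n : Int)) 1).foldl
        (fun (p : Int × Int) i =>
          let t := p.2 + 1
          ((PySem.List.pyRange (y - t) (y + 1) 1).foldl (fun s j => s - f i j) p.1, t))
        (s, t0)).1)
      = s - ((PySem.List.pyRange i0 (i0 + (n : Int)) 1).map
          (fun i => ((PySem.List.pyRange (y - (i - x)) (y + 1) 1).map (f i)).sum)).sum := by
  induction n with
  | zero =>
      intro i0 t0 s _
      rw [show i0 + ((0 : Nat) : Int) = i0 from by omega, PySem.List.pyRange_one_eq_nil le_rfl]
      simp
  | succ n ih =>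
      intro i0 t0 s ht0
      have hcons : PySem.List.pyRange i0 (i0 + ((n + 1 : Nat) : Int)) 1
          = i0 :: PySem.List.pyRange (i0 + 1) ((i0 + 1) + (n : Int)) 1 := by
        have hb : i0 + ((n + 1 : Nat) : Int) = (i0 + 1) + (n : Int) := by push_cast; ring
        rw [hb, PySem.List.pyRange_one_cons (by omega)]
      subst ht0
      rw [hcons]
      simp only [List.foldl_cons, List.map_cons, List.sum_cons, pvFoldlSub]
      have ht' : i0 - x - 1 + 1 = i0 - x := by ring
      rw [ht']
      have ih' := ih (i0 + 1) (i0 - x)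
        (s - ((PySem.List.pyRange (y - (i0 - x)) (y + 1) 1).map (f i0)).sum) (by ring)
      simp only [pvFoldlSub] at ih'
      rw [ih']
      ring

-- B's fused loop is the double sum of 'cell unless in triangle'
theorem pvAlt (f : Int → Int → Int) (x y : Int) (I J : List Int) (s : Int) :
    I.foldl (fun s i => J.foldl
        (fun s j =>
          let v := f i j
          let s := s + v
          if x ≤ i ∧ y - (i - x) ≤ j then s - v else s) s) s
      = s + (I.map (fun i => (J.map (fun j =>
          if x ≤ i ∧ y - (i - x) ≤ j then (0 : Int) else f i j)).sum)).sum := by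
  have h : (fun (s : Int) i => J.foldl
        (fun s j =>
          let v := f i j
          let s := s + v
          if x ≤ i ∧ y - (i - x) ≤ j then s - v else s) s)
      = fun s i => s + (J.map (fun j =>
          if x ≤ i ∧ y - (i - x) ≤ j then (0 : Int) else f i j)).sum := by
    funext s i
    have hb : (fun (s : Int) j =>
          let v := f i j
          let s := s + v
          if x ≤ i ∧ y - (i - x) ≤ j then s - v else s)
        = fun s j => s + (if x ≤ i ∧ y - (i - x) ≤ j then (0 : Int) else f i j) := by
      funext s j
      by_cases hc : x ≤ i ∧ y - (i - x) ≤ j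
      · simp only [if_pos hc]; ring
      · simp only [if_neg hc]
    rw [hb, PySem.List.foldl_add]
  rw [h, PySem.List.foldl_add]

-- ===== VERDICT (by name: the statement is the Claim_ definition above) =====
-- no library lemma for sums of pointwise differences over List.map
theorem pvSumMapSub (l : List Int) (f g : Int → Int) :
    (l.map (fun x => f x - g x)).sum = (l.map f).sum - (l.map g).sum := by
  induction l with
  | nil => simp
  | cons a l ih => simp only [List.map_cons, List.sum_cons, ih]; ring

theorem sum_1D_spec : Claim_unchanged_sum_1D := by
  intro graph x y d1 d2 _hdom _hpre hnd
  simp only [sum_1D, sum_1D_alt]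
  rw [pvRect, pvAlt]
  by_cases hd : d1 ≤ 0
  · -- no triangle rows at all, and B's condition never fires
    rw [PySem.List.pyRange_one_eq_nil (show x + d1 ≤ x by omega)]
    simp only [List.foldl_nil]
    congr 2
    refine List.map_congr_left (fun i hi => ?_)
    have hix : i < x := by
      have := (PySem.List.mem_pyRange_one.mp hi); omega
    congr 1
    refine List.map_congr_left (fun j _ => ?_)
    rw [if_neg (fun hc => absurd hc.1 (by omega))]
  · -- real triangle: x ≥ 0 and y ≥ d1 - 1 since we are outside D_
    simp only [D_sum_1D, not_and_or, not_or, not_lt] at hnd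
    rcases hnd with h | ⟨hx, hy⟩
    · omega
    have hcast : x + d1 = x + ((d1.toNat : Nat) : Int) := by omega
    rw [hcast, pvTri _ x y d1.toNat x (-1) _ (by ring)]
    have htri :
        ((PySem.List.pyRange 0 (x + ((d1.toNat : Nat) : Int)) 1).map
          (fun i => ((PySem.List.pyRange 0 (y + 1) 1).map (fun j =>
            if x ≤ i ∧ y - (i - x) ≤ j then PySem.List.pyGetD (PySem.List.pyGetD graph i []) j 0
            else 0)).sum)).sum
        = ((PySem.List.pyRange x (x + ((d1.toNat : Nat) : Int)) 1).map
          (fun i => ((PySem.List.pyRange (y - (i - x)) (y + 1) 1).map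
            (fun j => PySem.List.pyGetD (PySem.List.pyGetD graph i []) j 0)).sum)).sum := by
      rw [PySem.List.pyRange_one_append 0 x (x + ((d1.toNat : Nat) : Int)) (by omega) (by omega),
        List.map_append, List.sum_append]
      have h0 :
          ((PySem.List.pyRange 0 x 1).map
            (fun i => ((PySem.List.pyRange 0 (y + 1) 1).map (fun j =>
              if x ≤ i ∧ y - (i - x) ≤ j then PySem.List.pyGetD (PySem.List.pyGetD graph i []) j 0
              else 0)).sum)).sum = 0 := by
        refine List.sum_eq_zero (fun z hz => ?_)
        rcases List.mem_map.mp hz with ⟨i, hi, rfl⟩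
        have hix : i < x := by have := PySem.List.mem_pyRange_one.mp hi; omega
        refine List.sum_eq_zero (fun w hw => ?_)
        rcases List.mem_map.mp hw with ⟨j, _, rfl⟩
        rw [if_neg (fun hc => absurd hc.1 (by omega))]
      rw [h0, zero_add]
      refine congrArg List.sum (List.map_congr_left (fun i hi => ?_))
      have hib := PySem.List.mem_pyRange_one.mp hi
      have him : y - (i - x) ≤ y := by omega
      have hitop : i - x ≤ d1 - 1 := by omega
      rw [PySem.List.pyRange_one_append 0 (y - (i - x)) (y + 1) (by omega) (by omega),
        List.map_append, List.sum_append]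
      have h1 :
          ((PySem.List.pyRange 0 (y - (i - x)) 1).map (fun j =>
            if x ≤ i ∧ y - (i - x) ≤ j then PySem.List.pyGetD (PySem.List.pyGetD graph i []) j 0
            else 0)).sum = 0 := by
        refine List.sum_eq_zero (fun w hw => ?_)
        rcases List.mem_map.mp hw with ⟨j, hj, rfl⟩
        have hjb := PySem.List.mem_pyRange_one.mp hj
        rw [if_neg (fun hc => absurd hc.2 (by omega))]
      rw [h1, zero_add]
      refine congrArg List.sum (List.map_congr_left (fun j hj => ?_))
      have hjb := PySem.List.mem_pyRange_one.mp hj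
      rw [if_pos ⟨by omega, by omega⟩]
    rw [← htri]
    have hsplit :
        ((PySem.List.pyRange 0 (x + ((d1.toNat : Nat) : Int)) 1).map
          (fun i => ((PySem.List.pyRange 0 (y + 1) 1).map (fun j =>
            if x ≤ i ∧ y - (i - x) ≤ j then (0 : Int)
            else PySem.List.pyGetD (PySem.List.pyGetD graph i []) j 0)).sum)).sum
        = ((PySem.List.pyRange 0 (x + ((d1.toNat : Nat) : Int)) 1).map
            (fun i => ((PySem.List.pyRange 0 (y + 1) 1).map
              (fun j => PySem.List.pyGetD (PySem.List.pyGetD graph i []) j 0)).sum)).sum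
          - ((PySem.List.pyRange 0 (x + ((d1.toNat : Nat) : Int)) 1).map
            (fun i => ((PySem.List.pyRange 0 (y + 1) 1).map (fun j =>
              if x ≤ i ∧ y - (i - x) ≤ j then PySem.List.pyGetD (PySem.List.pyGetD graph i []) j 0
              else 0)).sum)).sum := by
      rw [← pvSumMapSub]
      refine congrArg List.sum (List.map_congr_left (fun i _ => ?_))
      rw [← pvSumMapSub]
      refine congrArg List.sum (List.map_congr_left (fun j _ => ?_))
      by_cases hc : x ≤ i ∧ y - (i - x) ≤ j
      · rw [if_pos hc, if_pos hc]; ring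
      · rw [if_neg hc, if_neg hc]; ring
    rw [hsplit]
    ring

theorem sum_1D_changed : Claim_changed_sum_1D := by
  unfold Claim_changed_sum_1D; decide
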